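-- pv_equiv track=rewrite | github.com/cefqrn/advent-of-code | 2025/03/p1.py | solve
-- ===== SOURCE A (Python) =====
-- def solve(data):
--     result = 0
--     for bank in data:
--         best = 0
--         hi, *bank = bank
--         for lo in bank:
--             curr = hi*10 + lo
--             hi = max(hi, lo)
--             best = max(best, curr)
--
--         result += best
--
--     return result
-- ===== SOURCE B (Python) =====
-- def solve(data):
--     total = 0
--     for bank in data:
--         best = 0
--         seen = []
--         for x in bank:
--             for a in seen:
--                 cand = a * 10 + x
--                 if cand > best:
--                     best = cand
--             seen.append(x)
--         total += best
--     return total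
-- ===== Notes on version B (the rewrite author's own statement) =====
-- stated objective: alternative
-- what changed: B replaces A's single-pass running-prefix-max recurrence with a brute force over all earlier/later pairs: it keeps the list of values seen so far and rescans it for every new element, so the hi/curr state machine disappears.
-- outside the precondition, e.g. on solve([[]]): A raises ValueError, B returns 0
import Mathlib
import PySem

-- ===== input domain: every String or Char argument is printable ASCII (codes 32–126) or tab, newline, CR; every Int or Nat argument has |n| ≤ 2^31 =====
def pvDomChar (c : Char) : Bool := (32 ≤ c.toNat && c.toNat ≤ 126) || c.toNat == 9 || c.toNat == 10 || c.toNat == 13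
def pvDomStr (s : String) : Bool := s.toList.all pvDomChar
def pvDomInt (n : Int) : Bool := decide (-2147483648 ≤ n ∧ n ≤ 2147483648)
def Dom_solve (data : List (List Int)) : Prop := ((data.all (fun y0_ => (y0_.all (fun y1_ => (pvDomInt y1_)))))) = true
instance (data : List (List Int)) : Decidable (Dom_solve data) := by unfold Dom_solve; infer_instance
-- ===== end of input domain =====

-- B is an alternative brute force over all earlier/later pairs (list of seen values
-- rescanned per element) instead of A's running-prefix-max one-pass recurrence; not faster.

-- ===== PORT A =====
-- inner loop of A: state (hi, best), 'for lo in bank'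
def solveAbank : Int → Int → List Int → Int
  | _, best, [] => best
  | hi, best, lo :: rest => solveAbank (max hi lo) (max best (hi * 10 + lo)) rest

def solve (data : List (List Int)) : Int :=
  data.foldl (fun result bank =>
    match bank with
    | [] => result  -- unreachable under Pre_solve: Python A raises ValueError here
    | hi :: rest => result + solveAbank hi 0 rest) 0

-- ===== PORT B =====
-- inner loop of B: 'for a in seen: if a*10+x > best: best = a*10+x'
def innerB (x : Int) (seen : List Int) (best : Int) : Int :=
  seen.foldl (fun b a => if a * 10 + x > b then a * 10 + x else b) best

-- outer per-bank loop of B: state (seen, best), 'seen.append(x)'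
def loopB : List Int → Int → List Int → Int
  | _, best, [] => best
  | seen, best, x :: rem => loopB (seen ++ [x]) (innerB x seen best) rem

def bankB (bank : List Int) : Int := loopB [] 0 bank

def solve_alt (data : List (List Int)) : Int :=
  data.foldl (fun total bank => total + bankB bank) 0

-- ===== PRECONDITION & SPEC =====
-- Pre_ excludes exactly the inputs where A raises: a bank with no elements
-- makes 'hi, *bank = bank' raise ValueError.
def Pre_solve (data : List (List Int)) : Prop := ∀ bank ∈ data, bank ≠ []
instance (data : List (List Int)) : Decidable (Pre_solve data) := by unfold Pre_solve; infer_instance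

def pvWitness_solve : List (List Int) := [[3, 7, 1], [5]]

def Spec_solve (data : List (List Int)) (out : Int) : Prop := out = solve_alt data
instance (data : List (List Int)) (out : Int) : Decidable (Spec_solve data out) := by unfold Spec_solve; infer_instance

-- ===== CLAIM (what is proved, stated in full; the proofs are below) =====
def Claim_equal_solve : Prop := ∀ (data : List (List Int)), Dom_solve data → Pre_solve data → Spec_solve data (solve data)

-- ===== LEMMAS AND PROOFS =====

theorem innerB_max (seen : List Int) (x hi best : Int) :
    innerB x seen (max best (hi * 10 + x)) = max best ((seen.foldl max hi) * 10 + x) := by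
  induction seen generalizing hi best with
  | nil => simp [innerB]
  | cons a seen ih =>
    show innerB x seen (if _ then _ else _) = _
    have h1 : (if a * 10 + x > max best (hi * 10 + x) then a * 10 + x else max best (hi * 10 + x))
        = max best ((max hi a) * 10 + x) := by
      rcases le_total hi a with h | h <;> rcases le_total (a * 10 + x) best with h2 | h2 <;>
        simp [max_def] <;> split <;> omega
    rw [h1, ih]
    simp

theorem innerB_cons (s : Int) (seen : List Int) (x best : Int) :
    innerB x (s :: seen) best = max best ((seen.foldl max s) * 10 + x) := by
  show innerB x seen (if _ then _ else _) = _
  have h1 : (if s * 10 + x > best then s * 10 + x else best) = max best (s * 10 + x) := by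
    rcases le_total (s * 10 + x) best with h | h <;> simp [max_def] <;> omega
  rw [h1, innerB_max]

theorem loopB_eq (rem : List Int) (s : Int) (seen : List Int) (best : Int) :
    loopB (s :: seen) best rem = solveAbank (seen.foldl max s) best rem := by
  induction rem generalizing seen best with
  | nil => rfl
  | cons x rem ih =>
    show loopB (s :: seen ++ [x]) (innerB x (s :: seen) best) rem = _
    rw [innerB_cons]
    rw [show (s :: seen ++ [x] : List Int) = s :: (seen ++ [x]) from rfl, ih]
    simp [solveAbank, List.foldl_append]

theorem bankB_eq (hi : Int) (rest : List Int) :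
    bankB (hi :: rest) = solveAbank hi 0 rest := by
  show loopB ([] ++ [hi]) (innerB hi [] 0) rest = _
  have := loopB_eq rest hi [] 0
  simpa [innerB] using this

theorem solve_foldl_eq (data : List (List Int)) (acc : Int)
    (h : ∀ bank ∈ data, bank ≠ []) :
    data.foldl (fun result bank =>
      match bank with
      | [] => result
      | hi :: rest => result + solveAbank hi 0 rest) acc
    = data.foldl (fun total bank => total + bankB bank) acc := by
  induction data generalizing acc with
  | nil => rfl
  | cons bank data ih =>
    match bank, h bank (by simp) with
    | hi :: rest, _ =>
      simp only [List.foldl_cons]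
      rw [bankB_eq]
      exact ih _ (fun b hb => h b (by simp [hb]))

-- ===== VERDICT (by name: the statement is the Claim_ definition above) =====
theorem solve_spec : Claim_equal_solve := by
  intro data _ hpre
  show solve data = solve_alt data
  exact solve_foldl_eq data 0 hpre
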